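-- pv_equiv track=rewrite | github.com/osok/hawkeye | src/hawkeye/detection/env_analysis.py | _extract_env_indicators
-- ===== SOURCE A (Python) =====
-- from typing import Dict, List, Optional, Any, Set, Tuple
--
-- def _extract_env_indicators(env_vars: Dict[str, str]) -> Dict[str, Any]:
--     """Extract various indicators from environment variables."""
--     indicators = {
--         'mcp_vars': [],
--         'transport_vars': [],
--         'port_vars': [],
--         'auth_vars': [],
--         'config_vars': [],
--         'tool_vars': [],
--     }
--
--     for key, value in env_vars.items():
--         key_lower = key.lower()
--         value_lower = value.lower()
--
--         # Categorize variables
--         if any(pattern in key_lower for pattern in ['mcp', 'model_context_protocol']):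
--             indicators['mcp_vars'].append({'key': key, 'value': value})
--
--         if any(pattern in key_lower for pattern in ['transport', 'http', 'websocket', 'stdio']):
--             indicators['transport_vars'].append({'key': key, 'value': value})
--
--         if 'port' in key_lower:
--             indicators['port_vars'].append({'key': key, 'value': value})
--
--         if any(pattern in key_lower for pattern in ['auth', 'token', 'key', 'secret']):
--             indicators['auth_vars'].append({'key': key, 'value': value})
--
--         if any(pattern in key_lower for pattern in ['config', 'settings', 'options']):
--             indicators['config_vars'].append({'key': key, 'value': value})
--
--         if any(pattern in key_lower for pattern in ['tool', 'capability', 'resource', 'prompt']):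
--             indicators['tool_vars'].append({'key': key, 'value': value})
--
--     return indicators
-- ===== SOURCE B (Python) =====
-- _CATEGORY_PATTERNS = [
--     ('mcp_vars', ['mcp', 'model_context_protocol']),
--     ('transport_vars', ['transport', 'http', 'websocket', 'stdio']),
--     ('port_vars', ['port']),
--     ('auth_vars', ['auth', 'token', 'key', 'secret']),
--     ('config_vars', ['config', 'settings', 'options']),
--     ('tool_vars', ['tool', 'capability', 'resource', 'prompt']),
-- ]
--
-- def _extract_env_indicators(env_vars):
--     """Extract various indicators from environment variables."""
--     return {
--         category: [{'key': key, 'value': value}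
--                    for key, value in env_vars.items()
--                    if any(p in key.lower() for p in patterns)]
--         for category, patterns in _CATEGORY_PATTERNS
--     }
-- ===== Notes on version B (the rewrite author's own statement) =====
-- stated objective: simpler
-- what changed: Replaces the single fold with six hard-coded conditional appends into a mutable dict by a declarative table of (category, patterns) pairs and one filtering comprehension per category (loop nesting inverted: categories outer, env vars inner), building each result list independently.
import Mathlib
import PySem

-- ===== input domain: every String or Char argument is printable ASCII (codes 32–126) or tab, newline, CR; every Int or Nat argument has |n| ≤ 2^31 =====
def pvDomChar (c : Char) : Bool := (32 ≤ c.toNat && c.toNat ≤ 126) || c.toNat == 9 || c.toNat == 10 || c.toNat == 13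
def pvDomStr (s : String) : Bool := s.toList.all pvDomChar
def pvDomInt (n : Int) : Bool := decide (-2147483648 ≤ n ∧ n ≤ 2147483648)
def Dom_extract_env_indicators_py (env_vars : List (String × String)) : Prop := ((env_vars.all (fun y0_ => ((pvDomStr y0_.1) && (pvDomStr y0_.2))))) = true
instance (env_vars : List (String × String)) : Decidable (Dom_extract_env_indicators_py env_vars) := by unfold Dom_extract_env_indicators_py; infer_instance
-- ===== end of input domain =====

-- B replaces A's single fold with six conditional appends by a (category, patterns) table
-- and one filtering pass per category — simpler, declarative; same O(n) cost.

-- ===== PORT A =====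
-- the loop body: six independent if-branches, each appending to the category's list in the dict
def pvStepA (d : PySem.Dict String (List (List (String × String)))) (kv : String × String) :
    PySem.Dict String (List (List (String × String))) :=
  let key := kv.1
  let value := kv.2
  let key_lower := PySem.Str.lower key
  let _value_lower := PySem.Str.lower value   -- computed and unused, as in A
  let entry : List (String × String) := [("key", key), ("value", value)]
  let d := if ["mcp", "model_context_protocol"].any (fun p => PySem.Str.isIn p key_lower)
           then d.modify "mcp_vars" [] (· ++ [entry]) else d
  let d := if ["transport", "http", "websocket", "stdio"].any (fun p => PySem.Str.isIn p key_lower)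
           then d.modify "transport_vars" [] (· ++ [entry]) else d
  let d := if PySem.Str.isIn "port" key_lower
           then d.modify "port_vars" [] (· ++ [entry]) else d
  let d := if ["auth", "token", "key", "secret"].any (fun p => PySem.Str.isIn p key_lower)
           then d.modify "auth_vars" [] (· ++ [entry]) else d
  let d := if ["config", "settings", "options"].any (fun p => PySem.Str.isIn p key_lower)
           then d.modify "config_vars" [] (· ++ [entry]) else d
  let d := if ["tool", "capability", "resource", "prompt"].any (fun p => PySem.Str.isIn p key_lower)
           then d.modify "tool_vars" [] (· ++ [entry]) else d
  d

def extract_env_indicators_py (env_vars : List (String × String)) :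
    List (String × List (List (String × String))) :=
  let indicators : PySem.Dict String (List (List (String × String))) :=
    PySem.Dict.mk [("mcp_vars", []), ("transport_vars", []), ("port_vars", []),
                   ("auth_vars", []), ("config_vars", []), ("tool_vars", [])]
  (env_vars.foldl pvStepA indicators).items

-- ===== PORT B =====
def pvCategoryPatterns : List (String × List String) :=
  [("mcp_vars", ["mcp", "model_context_protocol"]),
   ("transport_vars", ["transport", "http", "websocket", "stdio"]),
   ("port_vars", ["port"]),
   ("auth_vars", ["auth", "token", "key", "secret"]),
   ("config_vars", ["config", "settings", "options"]),
   ("tool_vars", ["tool", "capability", "resource", "prompt"])]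

def extract_env_indicators_py_alt (env_vars : List (String × String)) :
    List (String × List (List (String × String))) :=
  pvCategoryPatterns.map (fun cp =>
    (cp.1,
     (env_vars.filter (fun kv => cp.2.any (fun p => PySem.Str.isIn p (PySem.Str.lower kv.1)))).map
       (fun kv => [("key", kv.1), ("value", kv.2)])))

-- ===== PRECONDITION & SPEC =====
def Spec_extract_env_indicators_py (env_vars : List (String × String)) (out : List (String × List (List (String × String)))) : Prop := out = extract_env_indicators_py_alt env_vars
instance (env_vars : List (String × String)) (out : List (String × List (List (String × String)))) : Decidable (Spec_extract_env_indicators_py env_vars out) := by unfold Spec_extract_env_indicators_py; infer_instance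

-- ===== CLAIM (what is proved, stated in full; the proofs are below) =====
def Claim_equal_extract_env_indicators_py : Prop := ∀ (env_vars : List (String × String)), Dom_extract_env_indicators_py env_vars → Spec_extract_env_indicators_py env_vars (extract_env_indicators_py env_vars)

-- ===== LEMMAS AND PROOFS =====

-- category membership test for pattern list ps
def pvHit (ps : List String) (kv : String × String) : Bool :=
  ps.any (fun p => PySem.Str.isIn p (PySem.Str.lower kv.1))

def pvCat (ps : List String) (env : List (String × String)) : List (List (String × String)) :=
  (env.filter (fun kv => pvHit ps kv)).map (fun kv => [("key", kv.1), ("value", kv.2)])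

lemma pvCat_cons (ps : List String) (kv : String × String) (rest : List (String × String)) :
    pvCat ps (kv :: rest)
    = (if pvHit ps kv then [[("key", kv.1), ("value", kv.2)]] else []) ++ pvCat ps rest := by
  simp only [pvCat, List.filter_cons]
  split_ifs with h <;> simp_all

-- one conditional append into each fixed slot of the literal six-entry dict
lemma pvMod1 (c : Bool) (e : List (String × String))
    (a1 a2 a3 a4 a5 a6 : List (List (String × String))) :
    (if c then (PySem.Dict.mk [("mcp_vars", a1), ("transport_vars", a2), ("port_vars", a3), ("auth_vars", a4), ("config_vars", a5), ("tool_vars", a6)]).modify "mcp_vars" [] (· ++ [e]) else PySem.Dict.mk [("mcp_vars", a1), ("transport_vars", a2), ("port_vars", a3), ("auth_vars", a4), ("config_vars", a5), ("tool_vars", a6)])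
    = PySem.Dict.mk [("mcp_vars", a1 ++ if c then [e] else []), ("transport_vars", a2), ("port_vars", a3), ("auth_vars", a4), ("config_vars", a5), ("tool_vars", a6)] := by
  cases c <;>
    simp [PySem.Dict.modify, PySem.Dict.insert, PySem.Dict.getD, PySem.Dict.get?,
          PySem.Dict.contains]

lemma pvMod2 (c : Bool) (e : List (String × String))
    (a1 a2 a3 a4 a5 a6 : List (List (String × String))) :
    (if c then (PySem.Dict.mk [("mcp_vars", a1), ("transport_vars", a2), ("port_vars", a3), ("auth_vars", a4), ("config_vars", a5), ("tool_vars", a6)]).modify "transport_vars" [] (· ++ [e]) else PySem.Dict.mk [("mcp_vars", a1), ("transport_vars", a2), ("port_vars", a3), ("auth_vars", a4), ("config_vars", a5), ("tool_vars", a6)])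
    = PySem.Dict.mk [("mcp_vars", a1), ("transport_vars", a2 ++ if c then [e] else []), ("port_vars", a3), ("auth_vars", a4), ("config_vars", a5), ("tool_vars", a6)] := by
  cases c <;>
    simp [PySem.Dict.modify, PySem.Dict.insert, PySem.Dict.getD, PySem.Dict.get?,
          PySem.Dict.contains]

lemma pvMod3 (c : Bool) (e : List (String × String))
    (a1 a2 a3 a4 a5 a6 : List (List (String × String))) :
    (if c then (PySem.Dict.mk [("mcp_vars", a1), ("transport_vars", a2), ("port_vars", a3), ("auth_vars", a4), ("config_vars", a5), ("tool_vars", a6)]).modify "port_vars" [] (· ++ [e]) else PySem.Dict.mk [("mcp_vars", a1), ("transport_vars", a2), ("port_vars", a3), ("auth_vars", a4), ("config_vars", a5), ("tool_vars", a6)])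
    = PySem.Dict.mk [("mcp_vars", a1), ("transport_vars", a2), ("port_vars", a3 ++ if c then [e] else []), ("auth_vars", a4), ("config_vars", a5), ("tool_vars", a6)] := by
  cases c <;>
    simp [PySem.Dict.modify, PySem.Dict.insert, PySem.Dict.getD, PySem.Dict.get?,
          PySem.Dict.contains]

lemma pvMod4 (c : Bool) (e : List (String × String))
    (a1 a2 a3 a4 a5 a6 : List (List (String × String))) :
    (if c then (PySem.Dict.mk [("mcp_vars", a1), ("transport_vars", a2), ("port_vars", a3), ("auth_vars", a4), ("config_vars", a5), ("tool_vars", a6)]).modify "auth_vars" [] (· ++ [e]) else PySem.Dict.mk [("mcp_vars", a1), ("transport_vars", a2), ("port_vars", a3), ("auth_vars", a4), ("config_vars", a5), ("tool_vars", a6)])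
    = PySem.Dict.mk [("mcp_vars", a1), ("transport_vars", a2), ("port_vars", a3), ("auth_vars", a4 ++ if c then [e] else []), ("config_vars", a5), ("tool_vars", a6)] := by
  cases c <;>
    simp [PySem.Dict.modify, PySem.Dict.insert, PySem.Dict.getD, PySem.Dict.get?,
          PySem.Dict.contains]

lemma pvMod5 (c : Bool) (e : List (String × String))
    (a1 a2 a3 a4 a5 a6 : List (List (String × String))) :
    (if c then (PySem.Dict.mk [("mcp_vars", a1), ("transport_vars", a2), ("port_vars", a3), ("auth_vars", a4), ("config_vars", a5), ("tool_vars", a6)]).modify "config_vars" [] (· ++ [e]) else PySem.Dict.mk [("mcp_vars", a1), ("transport_vars", a2), ("port_vars", a3), ("auth_vars", a4), ("config_vars", a5), ("tool_vars", a6)])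
    = PySem.Dict.mk [("mcp_vars", a1), ("transport_vars", a2), ("port_vars", a3), ("auth_vars", a4), ("config_vars", a5 ++ if c then [e] else []), ("tool_vars", a6)] := by
  cases c <;>
    simp [PySem.Dict.modify, PySem.Dict.insert, PySem.Dict.getD, PySem.Dict.get?,
          PySem.Dict.contains]

lemma pvMod6 (c : Bool) (e : List (String × String))
    (a1 a2 a3 a4 a5 a6 : List (List (String × String))) :
    (if c then (PySem.Dict.mk [("mcp_vars", a1), ("transport_vars", a2), ("port_vars", a3), ("auth_vars", a4), ("config_vars", a5), ("tool_vars", a6)]).modify "tool_vars" [] (· ++ [e]) else PySem.Dict.mk [("mcp_vars", a1), ("transport_vars", a2), ("port_vars", a3), ("auth_vars", a4), ("config_vars", a5), ("tool_vars", a6)])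
    = PySem.Dict.mk [("mcp_vars", a1), ("transport_vars", a2), ("port_vars", a3), ("auth_vars", a4), ("config_vars", a5), ("tool_vars", a6 ++ if c then [e] else [])] := by
  cases c <;>
    simp [PySem.Dict.modify, PySem.Dict.insert, PySem.Dict.getD, PySem.Dict.get?,
          PySem.Dict.contains]

-- the loop over env, started from an arbitrary 6-list state, appends exactly the per-category lists
lemma pvLoop_eq (env : List (String × String))
    (a1 a2 a3 a4 a5 a6 : List (List (String × String))) :
    env.foldl pvStepA
      (PySem.Dict.mk [("mcp_vars", a1), ("transport_vars", a2), ("port_vars", a3), ("auth_vars", a4), ("config_vars", a5), ("tool_vars", a6)])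
    = PySem.Dict.mk
        [("mcp_vars", a1 ++ pvCat ["mcp", "model_context_protocol"] env),
         ("transport_vars", a2 ++ pvCat ["transport", "http", "websocket", "stdio"] env),
         ("port_vars", a3 ++ pvCat ["port"] env),
         ("auth_vars", a4 ++ pvCat ["auth", "token", "key", "secret"] env),
         ("config_vars", a5 ++ pvCat ["config", "settings", "options"] env),
         ("tool_vars", a6 ++ pvCat ["tool", "capability", "resource", "prompt"] env)] := by
  induction env generalizing a1 a2 a3 a4 a5 a6 with
  | nil => simp [pvCat]
  | cons kv rest ih =>
    rw [List.foldl_cons]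
    simp only [pvStepA]
    rw [pvMod1, pvMod2, pvMod3, pvMod4, pvMod5, pvMod6, ih]
    simp only [pvCat_cons, pvHit, List.any_cons, List.any_nil, Bool.or_false, List.append_assoc]

-- ===== VERDICT (by name: the statement is the Claim_ definition above) =====
theorem extract_env_indicators_py_spec : Claim_equal_extract_env_indicators_py := by
  intro env _
  unfold Spec_extract_env_indicators_py extract_env_indicators_py extract_env_indicators_py_alt
  show (List.foldl pvStepA (PySem.Dict.mk
        [("mcp_vars", []), ("transport_vars", []), ("port_vars", []),
         ("auth_vars", []), ("config_vars", []), ("tool_vars", [])]) env).items = _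
  rw [pvLoop_eq]
  simp only [pvCategoryPatterns, List.map, pvCat, pvHit, List.nil_append]
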